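-- pv_equiv track=rewrite | github.com/ScottSloan/Bili23-Downloader | src/utils/download.py | get_chunk_list
-- ===== SOURCE A (Python) =====
-- def get_chunk_list(total_size: int, chunk: int) -> list:
--     # 计算分片下载区间
--     piece_size = int(total_size / chunk)
--     chunk_list = []
--
--     for i in range(chunk):
--         start = i * piece_size + 1 if i != 0 else 0
--         end = (i + 1) * piece_size if i != chunk - 1 else total_size
--
--         chunk_list.append([start, end])
--
--     return chunk_list
-- ===== SOURCE B (Python) =====
-- def get_chunk_list(total_size: int, chunk: int) -> list:
--     # backward pass: thread each chunk's end down from total_size, then reverse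
--     piece_size = int(total_size / chunk)
--     out = []
--     end = total_size
--     i = chunk - 1
--     while i >= 0:
--         out.append([0 if i == 0 else i * piece_size + 1, end])
--         end = i * piece_size
--         i -= 1
--     out.reverse()
--     return out
-- ===== Notes on version B (the rewrite author's own statement) =====
-- stated objective: alternative
-- what changed: B replaces A's forward index loop (which derives both endpoints from i with two conditionals) by a backward while-pass that threads each chunk's end boundary as state down from total_size (so the last-chunk conditional disappears) and reverses the accumulated list at the end.
import Mathlib
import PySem

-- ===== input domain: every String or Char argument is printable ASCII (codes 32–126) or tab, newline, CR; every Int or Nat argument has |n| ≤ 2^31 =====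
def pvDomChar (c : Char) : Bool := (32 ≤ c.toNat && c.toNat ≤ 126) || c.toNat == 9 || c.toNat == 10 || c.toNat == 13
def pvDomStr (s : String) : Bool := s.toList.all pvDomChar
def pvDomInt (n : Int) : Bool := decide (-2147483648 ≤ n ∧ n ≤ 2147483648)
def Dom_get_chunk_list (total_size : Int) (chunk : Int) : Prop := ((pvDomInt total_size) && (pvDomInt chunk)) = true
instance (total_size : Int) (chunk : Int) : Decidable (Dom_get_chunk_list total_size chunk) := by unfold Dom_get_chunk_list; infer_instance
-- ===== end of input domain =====

-- B is a backward pass threading each chunk's end boundary as state down from total_size, reversed at the end (objective: alternative, same cost).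

-- ===== PORT A =====
-- int(total_size / chunk) is exact trunc-division on the stated |n| ≤ 2^31 domain: PySem.Int.truncdiv
def get_chunk_list (total_size : Int) (chunk : Int) : List (List Int) :=
  let piece_size := PySem.Int.truncdiv total_size chunk
  (PySem.List.pyRange 0 chunk 1).foldl
    (fun chunk_list i =>
      let start := if i ≠ 0 then i * piece_size + 1 else 0
      let «end» := if i ≠ chunk - 1 then (i + 1) * piece_size else total_size
      chunk_list ++ [[start, «end»]])
    []

-- ===== PORT B =====
-- the while-loop of Source B: i counts down from chunk-1 to 0 (modelled by the Nat index), `e` is the threaded end boundary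
def altLoop (piece : Int) : Nat → Int → List (List Int) → List (List Int)
  | 0, e, out => out ++ [[0, e]]
  | n+1, e, out =>
      altLoop piece n (((n : Int) + 1) * piece) (out ++ [[((n : Int) + 1) * piece + 1, e]])

def get_chunk_list_alt (total_size : Int) (chunk : Int) : List (List Int) :=
  let piece := PySem.Int.truncdiv total_size chunk
  if chunk - 1 < 0 then ([] : List (List Int)).reverse
  else (altLoop piece (chunk - 1).toNat total_size []).reverse

-- ===== PRECONDITION & SPEC =====
-- Pre_ excludes exactly chunk = 0, where the Python A raises ZeroDivisionError.
def Pre_get_chunk_list (total_size : Int) (chunk : Int) : Prop := chunk ≠ 0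
instance (total_size : Int) (chunk : Int) : Decidable (Pre_get_chunk_list total_size chunk) := by unfold Pre_get_chunk_list; infer_instance
def pvWitness_get_chunk_list : Int × Int := (100, 3)
def Spec_get_chunk_list (total_size : Int) (chunk : Int) (out : List (List Int)) : Prop := out = get_chunk_list_alt total_size chunk
instance (total_size : Int) (chunk : Int) (out : List (List Int)) : Decidable (Spec_get_chunk_list total_size chunk out) := by unfold Spec_get_chunk_list; infer_instance

-- ===== CLAIM (what is proved, stated in full; the proofs are below) =====
def Claim_equal_get_chunk_list : Prop := ∀ (total_size : Int) (chunk : Int), Dom_get_chunk_list total_size chunk → Pre_get_chunk_list total_size chunk → Spec_get_chunk_list total_size chunk (get_chunk_list total_size chunk)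

-- ===== LEMMAS AND PROOFS =====

-- row i of the output for a non-last chunk
def pvRow (p : Int) (i : Nat) : List Int :=
  [if i = 0 then 0 else (i : Int) * p + 1, ((i : Int) + 1) * p]

theorem altLoop_out (p : Int) (n : Nat) (e : Int) (out : List (List Int)) :
    altLoop p n e out = out ++ altLoop p n e [] := by
  induction n generalizing e out with
  | zero => simp [altLoop]
  | succ n ih =>
    rw [altLoop, altLoop, ih, ih (((n : Int) + 1) * p) ([] ++ [[((n : Int) + 1) * p + 1, e]])]
    simp

theorem altLoop_reverse (p : Int) (n : Nat) (e : Int) :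
    (altLoop p n e []).reverse =
      (List.range n).map (pvRow p) ++ [[if n = 0 then 0 else (n : Int) * p + 1, e]] := by
  induction n generalizing e with
  | zero => simp [altLoop]
  | succ n ih =>
    rw [altLoop, altLoop_out, List.reverse_append, ih, List.range_succ]
    simp [pvRow]

-- ===== VERDICT (by name: the statement is the Claim_ definition above) =====
theorem get_chunk_list_spec : Claim_equal_get_chunk_list := by
  intro t c _ hc
  unfold Spec_get_chunk_list
  simp only [get_chunk_list, get_chunk_list_alt]
  set p := PySem.Int.truncdiv t c with hp
  by_cases hpos : 0 < c
  · rw [if_neg (by omega)]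
    rw [PySem.List.foldl_append_singleton_eq_map, List.nil_append, altLoop_reverse]
    set n := (c - 1).toNat with hn
    have hcn : (c : Int) = (n : Int) + 1 := by omega
    apply List.ext_getElem
    · simp [PySem.List.length_pyRange_one]; omega
    · intro k h1 h2
      have hk : k < n + 1 := by
        simpa [PySem.List.length_pyRange_one, show c.toNat = n + 1 from by omega] using h1
      simp only [List.getElem_map, PySem.List.getElem_pyRange_one, zero_add]
      by_cases hlast : k < n
      · rw [List.getElem_append_left (by simpa using hlast)]
        simp only [List.getElem_map, List.getElem_range, pvRow]
        refine List.cons_eq_cons.mpr ⟨?_, List.cons_eq_cons.mpr ⟨?_, rfl⟩⟩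
        · split_ifs with hA hB <;> first | rfl | (exfalso; omega)
        · rw [if_pos (by omega)]
      · have hkn : k = n := by omega
        rw [List.getElem_append_right (by simpa using (by omega : ¬ k < n))]
        simp only [List.length_map, List.length_range, hkn]
        simp only [List.getElem_singleton]
        refine List.cons_eq_cons.mpr ⟨?_, List.cons_eq_cons.mpr ⟨?_, rfl⟩⟩
        · split_ifs with hA hB <;> first | rfl | (exfalso; omega)
        · rw [if_neg (by omega)]
  · -- c < 0 (c ≠ 0): range is empty, both sides are []
    rw [if_pos (by omega), PySem.List.pyRange_one_eq_nil (by omega)]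
    simp
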